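-- pv_equiv track=rewrite | github.com/billydev-secret/dungeon-keeper | services/wellness_service.py | badge_for_days
-- ===== SOURCE A (Python) =====
-- MILESTONES: tuple[tuple[int, str], ...] = (
--     (0, "🌱"),
--     (7, "🌟"),
--     (30, "🔥"),
--     (100, "💪"),
--     (365, "👑"),
-- )
--
-- def badge_for_days(days: int) -> str:
--     badge = "🌱"
--     for threshold, emoji in MILESTONES:
--         if days >= threshold:
--             badge = emoji
--         else:
--             break
--     return badge
-- ===== SOURCE B (Python) =====
-- THRESHOLDS = (0, 7, 30, 100, 365)
-- EMOJIS = ("🌱", "🌟", "🔥", "💪", "👑")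
--
-- def badge_for_days(days: int) -> str:
--     # binary search: lo becomes bisect_right(THRESHOLDS, days)
--     lo, hi = 0, len(THRESHOLDS)
--     while lo < hi:
--         mid = (lo + hi) // 2
--         if days < THRESHOLDS[mid]:
--             hi = mid
--         else:
--             lo = mid + 1
--     return EMOJIS[max(0, lo - 1)]
-- ===== Notes on version B (the rewrite author's own statement) =====
-- stated objective: alternative
-- what changed: Replaces the linear scan-with-break over (threshold, emoji) pairs by a hand-written binary search (bisect_right) over a tuple of thresholds, indexing a parallel emoji tuple with the clamped position.
import Mathlib
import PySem

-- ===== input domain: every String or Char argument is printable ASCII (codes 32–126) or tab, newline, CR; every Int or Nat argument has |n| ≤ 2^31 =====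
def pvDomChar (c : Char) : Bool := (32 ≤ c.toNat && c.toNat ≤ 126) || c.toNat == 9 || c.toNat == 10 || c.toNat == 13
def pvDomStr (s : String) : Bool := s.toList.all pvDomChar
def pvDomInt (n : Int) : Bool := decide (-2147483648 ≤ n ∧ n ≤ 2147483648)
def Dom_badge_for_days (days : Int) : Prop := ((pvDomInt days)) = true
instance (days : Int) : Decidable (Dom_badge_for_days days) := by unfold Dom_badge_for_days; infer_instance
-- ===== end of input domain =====

-- B replaces A's linear scan-with-break by a binary search (bisect_right) over the sorted thresholds: an alternative algorithm with the same result.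


-- ===== PORT A =====
def MILESTONES : List (Int × String) :=
  [(0, "🌱"), (7, "🌟"), (30, "🔥"), (100, "💪"), (365, "👑")]

-- A's for-loop with break, as structural recursion over the milestone list
def badgeLoop : List (Int × String) → Int → String → String
  | [], _, badge => badge
  | (threshold, emoji) :: rest, days, badge =>
      if days ≥ threshold then badgeLoop rest days emoji else badge

def badge_for_days (days : Int) : String :=
  badgeLoop MILESTONES days "🌱"

-- ===== PORT B =====
def THRESHOLDS : List Int := [0, 7, 30, 100, 365]
def EMOJIS : List String := ["🌱", "🌟", "🔥", "💪", "👑"]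

-- the while-loop of Source B (hand-written bisect_right); mid is always in range, so getD's default is unreachable
def bisectR (days : Int) (lo hi : Nat) : Nat :=
  if lo < hi then
    let mid := (lo + hi) / 2
    if days < THRESHOLDS.getD mid 0 then bisectR days lo mid
    else bisectR days (mid + 1) hi
  else lo
termination_by hi - lo
decreasing_by all_goals omega

def badge_for_days_alt (days : Int) : String :=
  let lo := bisectR days 0 THRESHOLDS.length
  EMOJIS.getD (max 0 ((lo : Int) - 1)).toNat ""

-- ===== PRECONDITION & SPEC =====
def Spec_badge_for_days (days : Int) (out : String) : Prop := out = badge_for_days_alt days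
instance (days : Int) (out : String) : Decidable (Spec_badge_for_days days out) := by unfold Spec_badge_for_days; infer_instance

-- ===== CLAIM (what is proved, stated in full; the proofs are below) =====
def Claim_equal_badge_for_days : Prop := ∀ (days : Int), Dom_badge_for_days days → Spec_badge_for_days days (badge_for_days days)

-- ===== LEMMAS AND PROOFS =====

-- step-by-step evaluation of the binary search on each of the six intervals
theorem bR0 (days : Int) (h : days < 0) : bisectR days 0 5 = 0 := by
  rw [bisectR]; norm_num [THRESHOLDS]
  rw [if_pos (by omega : days < 30)]
  rw [bisectR]; norm_num [THRESHOLDS]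
  rw [if_pos (by omega : days < 7)]
  rw [bisectR]; norm_num [THRESHOLDS]
  rw [if_pos h]
  rw [bisectR]; norm_num

theorem bR1 (days : Int) (h0 : 0 ≤ days) (h1 : days < 7) : bisectR days 0 5 = 1 := by
  rw [bisectR]; norm_num [THRESHOLDS]
  rw [if_pos (by omega : days < 30)]
  rw [bisectR]; norm_num [THRESHOLDS]
  rw [if_pos h1]
  rw [bisectR]; norm_num [THRESHOLDS]
  rw [if_neg (by omega : ¬ days < 0)]
  rw [bisectR]; norm_num

theorem bR2 (days : Int) (h0 : 7 ≤ days) (h1 : days < 30) : bisectR days 0 5 = 2 := by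
  rw [bisectR]; norm_num [THRESHOLDS]
  rw [if_pos h1]
  rw [bisectR]; norm_num [THRESHOLDS]
  rw [if_neg (by omega : ¬ days < 7)]
  rw [bisectR]; norm_num

theorem bR3 (days : Int) (h0 : 30 ≤ days) (h1 : days < 100) : bisectR days 0 5 = 3 := by
  rw [bisectR]; norm_num [THRESHOLDS]
  rw [if_neg (by omega : ¬ days < 30)]
  rw [bisectR]; norm_num [THRESHOLDS]
  rw [if_pos (by omega : days < 365)]
  rw [bisectR]; norm_num [THRESHOLDS]
  rw [if_pos h1]
  rw [bisectR]; norm_num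

theorem bR4 (days : Int) (h0 : 100 ≤ days) (h1 : days < 365) : bisectR days 0 5 = 4 := by
  rw [bisectR]; norm_num [THRESHOLDS]
  rw [if_neg (by omega : ¬ days < 30)]
  rw [bisectR]; norm_num [THRESHOLDS]
  rw [if_pos h1]
  rw [bisectR]; norm_num [THRESHOLDS]
  rw [if_neg (by omega : ¬ days < 100)]
  rw [bisectR]; norm_num

theorem bR5 (days : Int) (h0 : 365 ≤ days) : bisectR days 0 5 = 5 := by
  rw [bisectR]; norm_num [THRESHOLDS]
  rw [if_neg (by omega : ¬ days < 30)]
  rw [bisectR]; norm_num [THRESHOLDS]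
  rw [if_neg (by omega : ¬ days < 365)]
  rw [bisectR]; norm_num

-- ===== VERDICT (by name: the statement is the Claim_ definition above) =====
theorem badge_for_days_spec : Claim_equal_badge_for_days := by
  intro days _
  unfold Spec_badge_for_days badge_for_days badge_for_days_alt
  have hlen : THRESHOLDS.length = 5 := by norm_num [THRESHOLDS]
  rw [hlen]
  by_cases h0 : days < 0
  · rw [bR0 days h0]
    simp [badgeLoop, MILESTONES, EMOJIS, h0]
  · by_cases h1 : days < 7
    · rw [bR1 days (by omega) h1]
      simp [badgeLoop, MILESTONES, EMOJIS, (by omega : days ≥ 0)]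
      exact fun h => absurd h (by omega)
    · by_cases h2 : days < 30
      · rw [bR2 days (by omega) h2]
        simp [badgeLoop, MILESTONES, EMOJIS, (by omega : days ≥ 0), (by omega : days ≥ 7)]
        exact fun h => absurd h (by omega)
      · by_cases h3 : days < 100
        · rw [bR3 days (by omega) h3]
          simp [badgeLoop, MILESTONES, EMOJIS, (by omega : days ≥ 0), (by omega : days ≥ 7),
            (by omega : days ≥ 30)]
          exact fun h => absurd h (by omega)
        · by_cases h4 : days < 365
          · rw [bR4 days (by omega) h4]
            simp [badgeLoop, MILESTONES, EMOJIS, (by omega : days ≥ 0), (by omega : days ≥ 7),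
              (by omega : days ≥ 30), (by omega : days ≥ 100)]
            omega
          · rw [bR5 days (by omega)]
            simp [badgeLoop, MILESTONES, EMOJIS, (by omega : days ≥ 0), (by omega : days ≥ 7),
              (by omega : days ≥ 30), (by omega : days ≥ 100), (by omega : days ≥ 365)]
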